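-- pv_equiv track=rewrite | github.com/ClassicRacer/car-mania | game/render/level_utils.py | _build_maze_walls
-- ===== SOURCE A (Python) =====
-- from typing import Dict, Iterable, List, Optional, Tuple
--
-- MAZE_TILE_SIZE = 200
--
-- def _build_maze_walls(
--     width: int,
--     height: int,
--     adjacency: Dict[Tuple[int, int], Iterable[Tuple[int, int]]],
--     origin: Tuple[int, int],
-- ):
--     walls = set()
--     base_x, base_y = origin
--
--     def add_wall(x: int, y: int, angle: int):
--         walls.add((x, y, angle))
--
--     for cy in range(height):
--         for cx in range(width):
--             x_pos = base_x + cx * MAZE_TILE_SIZE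
--             y_pos = base_y + cy * MAZE_TILE_SIZE
--             neighbours = adjacency.get((cx, cy), ())
--
--             if cy == 0:
--                 add_wall(x_pos, y_pos, 0)
--             if cx == 0:
--                 add_wall(x_pos, y_pos, 90)
--
--             right = (cx + 1, cy)
--             if cx == width - 1 or right not in neighbours:
--                 add_wall(x_pos + MAZE_TILE_SIZE, y_pos, 90)
--
--             down = (cx, cy + 1)
--             if cy == height - 1 or down not in neighbours:
--                 add_wall(x_pos, y_pos + MAZE_TILE_SIZE, 0)
--
--     ordered = sorted(walls)
--     return ordered
-- ===== SOURCE B (Python) =====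
-- MAZE_TILE_SIZE = 200
--
-- def _build_maze_walls(width, height, adjacency, origin):
--     # Different decomposition: build the complete wall grid unconditionally,
--     # then carve out interior walls where the adjacency opens a passage.
--     if width <= 0 or height <= 0:
--         return []
--     base_x, base_y = origin
--     t = MAZE_TILE_SIZE
--     walls = set()
--     # every vertical wall of the full grid
--     for cy in range(height):
--         for cx in range(width + 1):
--             walls.add((base_x + cx * t, base_y + cy * t, 90))
--     # every horizontal wall of the full grid
--     for cy in range(height + 1):
--         for cx in range(width):
--             walls.add((base_x + cx * t, base_y + cy * t, 0))
--     # carve passages: only right/down openings of each cell, interior walls only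
--     for cy in range(height):
--         for cx in range(width):
--             neighbours = adjacency.get((cx, cy), ())
--             if cx < width - 1 and (cx + 1, cy) in neighbours:
--                 walls.discard((base_x + (cx + 1) * t, base_y + cy * t, 90))
--             if cy < height - 1 and (cx, cy + 1) in neighbours:
--                 walls.discard((base_x + cx * t, base_y + (cy + 1) * t, 0))
--     return sorted(walls)
-- ===== Notes on version B (the rewrite author's own statement) =====
-- stated objective: alternative
-- what changed: B builds the complete wall grid unconditionally (all horizontal and vertical segments) and then carves out interior walls where the cell's right/down adjacency opens a passage, instead of A's single pass adding each wall under per-cell boundary/adjacency conditions.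
import Mathlib
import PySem

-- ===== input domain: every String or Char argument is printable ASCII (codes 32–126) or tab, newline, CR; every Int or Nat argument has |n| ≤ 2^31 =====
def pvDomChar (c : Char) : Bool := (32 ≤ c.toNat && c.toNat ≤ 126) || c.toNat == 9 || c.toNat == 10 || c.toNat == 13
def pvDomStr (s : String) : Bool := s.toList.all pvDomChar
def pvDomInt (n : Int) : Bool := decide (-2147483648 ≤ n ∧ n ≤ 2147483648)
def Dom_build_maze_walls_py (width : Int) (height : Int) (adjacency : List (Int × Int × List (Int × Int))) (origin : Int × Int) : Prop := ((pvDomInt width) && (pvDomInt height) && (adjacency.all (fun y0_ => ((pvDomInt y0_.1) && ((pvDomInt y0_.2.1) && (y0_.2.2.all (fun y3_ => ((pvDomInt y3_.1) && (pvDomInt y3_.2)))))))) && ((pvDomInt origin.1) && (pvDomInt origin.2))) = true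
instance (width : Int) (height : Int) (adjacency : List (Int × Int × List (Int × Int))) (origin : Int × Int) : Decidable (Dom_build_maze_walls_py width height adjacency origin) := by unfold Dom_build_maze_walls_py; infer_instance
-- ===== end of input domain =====

-- B builds the complete wall grid unconditionally and then carves interior walls where a
-- cell's right/down adjacency opens a passage (alternative decomposition; same cost as A).

-- ===== PORT A =====
-- adjacency.get((cx, cy), ()): first matching key in the association list (shared lookup helper)
def pvAdjGet (adj : List (Int × Int × List (Int × Int))) (cx cy : Int) : List (Int × Int) :=
  match adj with
  | [] => []
  | (a, b, ns) :: rest => if a = cx ∧ b = cy then ns else pvAdjGet rest cx cy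

-- sorted(walls): Python compares (x, y, angle) tuples lexicographically; the injective
-- key into the lexicographic product order makes PySem.List.sorted exact here.
def pvKey (w : Int × Int × Int) : Lex (Int × Lex (Int × Int)) :=
  toLex (w.1, toLex (w.2.1, w.2.2))

-- the body of A's inner loop (the four conditional add_wall calls), verbatim
def pvStepA (width height : Int) (adjacency : List (Int × Int × List (Int × Int)))
    (bx by_ : Int) (walls : PySem.Set (Int × Int × Int)) (cx cy : Int) :
    PySem.Set (Int × Int × Int) :=
  let x_pos := bx + cx * 200
  let y_pos := by_ + cy * 200
  let neighbours := pvAdjGet adjacency cx cy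
  let walls := if cy = 0 then PySem.Set.add walls (x_pos, y_pos, 0) else walls
  let walls := if cx = 0 then PySem.Set.add walls (x_pos, y_pos, 90) else walls
  let walls := if cx = width - 1 ∨ (cx + 1, cy) ∉ neighbours then PySem.Set.add walls (x_pos + 200, y_pos, 90) else walls
  let walls := if cy = height - 1 ∨ (cx, cy + 1) ∉ neighbours then PySem.Set.add walls (x_pos, y_pos + 200, 0) else walls
  walls

def build_maze_walls_py (width : Int) (height : Int) (adjacency : List (Int × Int × List (Int × Int))) (origin : Int × Int) : List (Int × Int × Int) :=
  let walls : PySem.Set (Int × Int × Int) :=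
    (PySem.List.pyRange 0 height 1).foldl (fun walls cy =>
      (PySem.List.pyRange 0 width 1).foldl (fun walls cx =>
        pvStepA width height adjacency origin.1 origin.2 walls cx cy) walls) PySem.Set.empty
  PySem.List.sorted walls pvKey false

-- ===== PORT B =====
-- the body of B's carving loop (the two conditional discards), verbatim
def pvStepB (width height : Int) (adjacency : List (Int × Int × List (Int × Int)))
    (bx by_ : Int) (s : PySem.Set (Int × Int × Int)) (cx cy : Int) :
    PySem.Set (Int × Int × Int) :=
  let neighbours := pvAdjGet adjacency cx cy
  let s := if cx < width - 1 ∧ (cx + 1, cy) ∈ neighbours then PySem.Set.discard s (bx + (cx + 1) * 200, by_ + cy * 200, 90) else s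
  let s := if cy < height - 1 ∧ (cx, cy + 1) ∈ neighbours then PySem.Set.discard s (bx + cx * 200, by_ + (cy + 1) * 200, 0) else s
  s

def build_maze_walls_py_alt (width : Int) (height : Int) (adjacency : List (Int × Int × List (Int × Int))) (origin : Int × Int) : List (Int × Int × Int) :=
  if width ≤ 0 ∨ height ≤ 0 then [] else
  let walls : PySem.Set (Int × Int × Int) :=
    (PySem.List.pyRange 0 height 1).foldl (fun s cy =>
      (PySem.List.pyRange 0 (width + 1) 1).foldl (fun s cx =>
        PySem.Set.add s (origin.1 + cx * 200, origin.2 + cy * 200, 90)) s) PySem.Set.empty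
  let walls :=
    (PySem.List.pyRange 0 (height + 1) 1).foldl (fun s cy =>
      (PySem.List.pyRange 0 width 1).foldl (fun s cx =>
        PySem.Set.add s (origin.1 + cx * 200, origin.2 + cy * 200, 0)) s) walls
  let walls :=
    (PySem.List.pyRange 0 height 1).foldl (fun s cy =>
      (PySem.List.pyRange 0 width 1).foldl (fun s cx =>
        pvStepB width height adjacency origin.1 origin.2 s cx cy) s) walls
  PySem.List.sorted walls pvKey false

-- ===== PRECONDITION & SPEC =====
def Spec_build_maze_walls_py (width : Int) (height : Int) (adjacency : List (Int × Int × List (Int × Int))) (origin : Int × Int) (out : List (Int × Int × Int)) : Prop := out = build_maze_walls_py_alt width height adjacency origin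
instance (width : Int) (height : Int) (adjacency : List (Int × Int × List (Int × Int))) (origin : Int × Int) (out : List (Int × Int × Int)) : Decidable (Spec_build_maze_walls_py width height adjacency origin out) := by unfold Spec_build_maze_walls_py; infer_instance

-- ===== CLAIM (what is proved, stated in full; the proofs are below) =====
def Claim_equal_build_maze_walls_py : Prop := ∀ (width : Int) (height : Int) (adjacency : List (Int × Int × List (Int × Int))) (origin : Int × Int), Dom_build_maze_walls_py width height adjacency origin → Spec_build_maze_walls_py width height adjacency origin (build_maze_walls_py width height adjacency origin)

-- ===== LEMMAS AND PROOFS =====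

-- generic fold lemmas: membership and nodup through a fold whose step adds/removes per-step elements
theorem pv_mem_foldl_set {α β : Type} [BEq β] (f : PySem.Set β → α → PySem.Set β)
    (P : α → β → Prop) (hmem : ∀ s x v, v ∈ f s x ↔ v ∈ s ∨ P x v) :
    ∀ (l : List α) (s : PySem.Set β) (v : β),
      v ∈ l.foldl f s ↔ v ∈ s ∨ ∃ x ∈ l, P x v := by
  intro l
  induction l with
  | nil => simp
  | cons a t ih =>
    intro s v
    simp only [List.foldl_cons, ih, hmem, List.mem_cons]
    constructor
    · rintro (⟨h | h⟩ | ⟨x, hx, hP⟩)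
      · exact Or.inl h
      · exact Or.inr ⟨a, Or.inl rfl, h⟩
      · exact Or.inr ⟨x, Or.inr hx, hP⟩
    · rintro (h | ⟨x, (rfl | hx), hP⟩)
      · exact Or.inl (Or.inl h)
      · exact Or.inl (Or.inr hP)
      · exact Or.inr ⟨x, hx, hP⟩

theorem pv_mem_foldl_del {α β : Type} [BEq β] (f : PySem.Set β → α → PySem.Set β)
    (Q : α → β → Prop) (hmem : ∀ s x v, v ∈ f s x ↔ v ∈ s ∧ ¬ Q x v) :
    ∀ (l : List α) (s : PySem.Set β) (v : β),
      v ∈ l.foldl f s ↔ v ∈ s ∧ ∀ x ∈ l, ¬ Q x v := by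
  intro l
  induction l with
  | nil => simp
  | cons a t ih =>
    intro s v
    simp only [List.foldl_cons, ih, hmem, List.mem_cons]
    constructor
    · rintro ⟨⟨hs, hna⟩, ht⟩
      refine ⟨hs, ?_⟩
      rintro x (rfl | hx)
      · exact hna
      · exact ht x hx
    · rintro ⟨hs, h⟩
      exact ⟨⟨hs, h a (Or.inl rfl)⟩, fun x hx => h x (Or.inr hx)⟩

theorem pv_nodup_foldl_set {α β : Type} [BEq β] (f : PySem.Set β → α → PySem.Set β)
    (hnd : ∀ s x, s.Nodup → (f s x).Nodup) :
    ∀ (l : List α) (s : PySem.Set β), s.Nodup → (l.foldl f s).Nodup := by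
  intro l
  induction l with
  | nil => intro s hs; simpa using hs
  | cons a t ih => intro s hs; exact ih _ (hnd s a hs)

-- what A's inner-loop body contributes and what B's carving body removes (proof-only predicates)
def pvCellA (width height : Int) (adj : List (Int × Int × List (Int × Int))) (bx by_ : Int)
    (c : Int × Int) (v : Int × Int × Int) : Prop :=
  (c.2 = 0 ∧ v = (bx + c.1 * 200, by_ + c.2 * 200, 0)) ∨
  (c.1 = 0 ∧ v = (bx + c.1 * 200, by_ + c.2 * 200, 90)) ∨
  ((c.1 = width - 1 ∨ (c.1 + 1, c.2) ∉ pvAdjGet adj c.1 c.2) ∧ v = (bx + c.1 * 200 + 200, by_ + c.2 * 200, 90)) ∨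
  ((c.2 = height - 1 ∨ (c.1, c.2 + 1) ∉ pvAdjGet adj c.1 c.2) ∧ v = (bx + c.1 * 200, by_ + c.2 * 200 + 200, 0))

def pvCellR (width height : Int) (adj : List (Int × Int × List (Int × Int))) (bx by_ : Int)
    (c : Int × Int) (v : Int × Int × Int) : Prop :=
  (c.1 < width - 1 ∧ (c.1 + 1, c.2) ∈ pvAdjGet adj c.1 c.2 ∧ v = (bx + (c.1 + 1) * 200, by_ + c.2 * 200, 90)) ∨
  (c.2 < height - 1 ∧ (c.1, c.2 + 1) ∈ pvAdjGet adj c.1 c.2 ∧ v = (bx + c.1 * 200, by_ + (c.2 + 1) * 200, 0))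

theorem pv_mem_stepA (w h : Int) (adj : List (Int × Int × List (Int × Int))) (bx by_ : Int)
    (s : PySem.Set (Int × Int × Int)) (cx cy : Int) (v : Int × Int × Int) :
    v ∈ pvStepA w h adj bx by_ s cx cy ↔ v ∈ s ∨ pvCellA w h adj bx by_ (cx, cy) v := by
  unfold pvStepA pvCellA
  dsimp only
  split_ifs <;>
    simp_all only [PySem.Set.mem_add, true_and, false_and, false_or, or_false] <;> tauto

theorem pv_nodup_stepA (w h : Int) (adj : List (Int × Int × List (Int × Int))) (bx by_ : Int)
    (s : PySem.Set (Int × Int × Int)) (cx cy : Int) (hs : s.Nodup) :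
    (pvStepA w h adj bx by_ s cx cy).Nodup := by
  unfold pvStepA
  dsimp only
  split_ifs <;> (repeat first | assumption | apply PySem.Set.nodup_add)

theorem pv_mem_stepB (w h : Int) (adj : List (Int × Int × List (Int × Int))) (bx by_ : Int)
    (s : PySem.Set (Int × Int × Int)) (cx cy : Int) (v : Int × Int × Int) :
    v ∈ pvStepB w h adj bx by_ s cx cy ↔ v ∈ s ∧ ¬ pvCellR w h adj bx by_ (cx, cy) v := by
  unfold pvStepB pvCellR
  dsimp only
  split_ifs <;>
    (try simp_all only [PySem.Set.mem_discard, true_and]) <;>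
    tauto

theorem pv_nodup_stepB (w h : Int) (adj : List (Int × Int × List (Int × Int))) (bx by_ : Int)
    (s : PySem.Set (Int × Int × Int)) (cx cy : Int) (hs : s.Nodup) :
    (pvStepB w h adj bx by_ s cx cy).Nodup := by
  unfold pvStepB
  dsimp only
  split_ifs <;> (repeat first | assumption | apply PySem.Set.nodup_discard)

theorem pvKey_inj : Function.Injective pvKey := by
  rintro ⟨a1, a2, a3⟩ ⟨b1, b2, b3⟩ hab
  simpa [pvKey, Prod.mk.injEq] using hab

-- the heart of the equivalence: per-cell conditional walls = full grid minus carved openings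
theorem pv_crux (w h : Int) (adj : List (Int × Int × List (Int × Int))) (bx by_ : Int)
    (hw : 0 < w) (hh : 0 < h) (v : Int × Int × Int) :
    (∃ cy, (0 ≤ cy ∧ cy < h) ∧ ∃ cx, (0 ≤ cx ∧ cx < w) ∧ pvCellA w h adj bx by_ (cx, cy) v)
    ↔ ((∃ cy, (0 ≤ cy ∧ cy < h) ∧ ∃ cx, (0 ≤ cx ∧ cx < w + 1) ∧ v = (bx + cx * 200, by_ + cy * 200, 90)) ∨
       (∃ cy, (0 ≤ cy ∧ cy < h + 1) ∧ ∃ cx, (0 ≤ cx ∧ cx < w) ∧ v = (bx + cx * 200, by_ + cy * 200, 0)))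
      ∧ (∀ cy, 0 ≤ cy → cy < h → ∀ cx, 0 ≤ cx → cx < w → ¬ pvCellR w h adj bx by_ (cx, cy) v) := by
  obtain ⟨vx, vy, va⟩ := v
  constructor
  · rintro ⟨cy, ⟨hcy0, hcyh⟩, cx, ⟨hcx0, hcxw⟩, hc⟩
    rcases hc with ⟨hc0, hv⟩ | ⟨hc0, hv⟩ | ⟨hc0, hv⟩ | ⟨hc0, hv⟩ <;>
      simp only [Prod.mk.injEq] at hv <;> obtain ⟨h1, h2, h3⟩ := hv
    · -- top wall, cy = 0
      refine ⟨Or.inr ⟨cy, ⟨hcy0, by omega⟩, cx, ⟨hcx0, hcxw⟩, by simp [h1, h2, h3]⟩, ?_⟩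
      rintro dy hdy0 hdyh dx hdx0 hdxw (⟨_, _, hv⟩ | ⟨_, _, hv⟩) <;>
        simp only [Prod.mk.injEq] at hv <;> omega
    · -- left wall, cx = 0
      refine ⟨Or.inl ⟨cy, ⟨hcy0, hcyh⟩, cx, ⟨hcx0, by omega⟩, by simp [h1, h2, h3]⟩, ?_⟩
      rintro dy hdy0 hdyh dx hdx0 hdxw (⟨_, _, hv⟩ | ⟨_, _, hv⟩) <;>
        simp only [Prod.mk.injEq] at hv <;> omega
    · -- right wall of (cx, cy)
      refine ⟨Or.inl ⟨cy, ⟨hcy0, hcyh⟩, cx + 1, ⟨by omega, by omega⟩, by simp only [Prod.mk.injEq]; omega⟩, ?_⟩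
      rintro dy hdy0 hdyh dx hdx0 hdxw (⟨hlt, hmem, hv⟩ | ⟨_, _, hv⟩) <;>
        simp only [Prod.mk.injEq] at hv
      · have hdx : dx = cx := by omega
        have hdy : dy = cy := by omega
        subst hdx; subst hdy
        rcases hc0 with h' | h'
        · omega
        · exact h' hmem
      · omega
    · -- bottom wall of (cx, cy)
      refine ⟨Or.inr ⟨cy + 1, ⟨by omega, by omega⟩, cx, ⟨hcx0, hcxw⟩, by simp only [Prod.mk.injEq]; omega⟩, ?_⟩
      rintro dy hdy0 hdyh dx hdx0 hdxw (⟨_, _, hv⟩ | ⟨hlt, hmem, hv⟩) <;>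
        simp only [Prod.mk.injEq] at hv
      · omega
      · have hdx : dx = cx := by omega
        have hdy : dy = cy := by omega
        subst hdx; subst hdy
        rcases hc0 with h' | h'
        · omega
        · exact h' hmem
  · rintro ⟨hfull, hR⟩
    rcases hfull with ⟨cy, ⟨hcy0, hcyh⟩, cx, ⟨hcx0, hcxw⟩, hv⟩ | ⟨cy, ⟨hcy0, hcyh⟩, cx, ⟨hcx0, hcxw⟩, hv⟩ <;>
      simp only [Prod.mk.injEq] at hv <;> obtain ⟨h1, h2, h3⟩ := hv
    · -- vertical wall at column cx ∈ [0, w]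
      by_cases hcx : cx = 0
      · exact ⟨cy, ⟨hcy0, hcyh⟩, 0, ⟨le_refl 0, hw⟩,
          Or.inr (Or.inl ⟨rfl, by simp only [Prod.mk.injEq]; omega⟩)⟩
      · by_cases hcw : cx = w
        · exact ⟨cy, ⟨hcy0, hcyh⟩, w - 1, ⟨by omega, by omega⟩,
            Or.inr (Or.inr (Or.inl ⟨Or.inl rfl, by simp only [Prod.mk.injEq]; omega⟩))⟩
        · -- interior column: 0 < cx < w; absence of the opening comes from the carving pass
          refine ⟨cy, ⟨hcy0, hcyh⟩, cx - 1, ⟨by omega, by omega⟩,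
            Or.inr (Or.inr (Or.inl ⟨Or.inr ?_, by simp only [Prod.mk.injEq]; omega⟩))⟩
          intro hmem
          exact hR cy hcy0 hcyh (cx - 1) (by omega) (by omega)
            (Or.inl ⟨by omega, by simpa using hmem, by simp only [Prod.mk.injEq]; omega⟩)
    · -- horizontal wall at row cy ∈ [0, h]
      by_cases hcy : cy = 0
      · exact ⟨0, ⟨le_refl 0, hh⟩, cx, ⟨hcx0, hcxw⟩,
          Or.inl ⟨rfl, by simp only [Prod.mk.injEq]; omega⟩⟩
      · by_cases hch : cy = h
        · exact ⟨h - 1, ⟨by omega, by omega⟩, cx, ⟨hcx0, hcxw⟩,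
            Or.inr (Or.inr (Or.inr ⟨Or.inl rfl, by simp only [Prod.mk.injEq]; omega⟩))⟩
        · refine ⟨cy - 1, ⟨by omega, by omega⟩, cx, ⟨hcx0, hcxw⟩,
            Or.inr (Or.inr (Or.inr ⟨Or.inr ?_, by simp only [Prod.mk.injEq]; omega⟩))⟩
          intro hmem
          exact hR (cy - 1) (by omega) (by omega) cx hcx0 hcxw
            (Or.inr ⟨by omega, by simpa using hmem, by simp only [Prod.mk.injEq]; omega⟩)

-- ===== VERDICT (by name: the statement is the Claim_ definition above) =====
theorem build_maze_walls_py_spec : Claim_equal_build_maze_walls_py := by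
  intro w h adj origin _
  unfold Spec_build_maze_walls_py build_maze_walls_py build_maze_walls_py_alt
  obtain ⟨bx, by_⟩ := origin
  by_cases hdeg : w ≤ 0 ∨ h ≤ 0
  · rw [if_pos hdeg]
    rcases hdeg with hd | hd <;>
      simp [PySem.List.pyRange_one_eq_nil hd, PySem.List.sorted_eq_nil_iff, PySem.Set.empty]
  · rw [if_neg hdeg]
    have hw : 0 < w := by omega
    have hh : 0 < h := by omega
    dsimp only
    refine PySem.List.sorted_eq_sorted_of_perm _ _ pvKey pvKey_inj
      ((List.perm_ext_iff_of_nodup ?_ ?_).mpr ?_)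
    · -- A's set is Nodup
      refine pv_nodup_foldl_set _ ?_ _ _ List.nodup_nil
      intro s cy hs
      refine pv_nodup_foldl_set _ ?_ _ _ hs
      intro s cx hs
      exact pv_nodup_stepA w h adj bx by_ s cx cy hs
    · -- B's set is Nodup
      refine pv_nodup_foldl_set _ ?_ _ _ ?_
      · intro s cy hs
        refine pv_nodup_foldl_set _ ?_ _ _ hs
        intro s cx hs
        exact pv_nodup_stepB w h adj bx by_ s cx cy hs
      refine pv_nodup_foldl_set _ ?_ _ _ ?_
      · intro s cy hs
        refine pv_nodup_foldl_set _ ?_ _ _ hs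
        intro s cx hs
        exact PySem.Set.nodup_add _ _ hs
      refine pv_nodup_foldl_set _ ?_ _ _ List.nodup_nil
      intro s cy hs
      refine pv_nodup_foldl_set _ ?_ _ _ hs
      intro s cx hs
      exact PySem.Set.nodup_add _ _ hs
    · -- same membership
      intro v
      -- A's set
      rw [pv_mem_foldl_set _
        (fun cy v => ∃ cx ∈ PySem.List.pyRange 0 w 1, pvCellA w h adj bx by_ (cx, cy) v)
        (fun s cy v => pv_mem_foldl_set _
          (fun cx v => pvCellA w h adj bx by_ (cx, cy) v)
          (fun s cx v => pv_mem_stepA w h adj bx by_ s cx cy v) _ s v)]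
      -- B's carving pass
      rw [pv_mem_foldl_del _
        (fun cy v => ∃ cx ∈ PySem.List.pyRange 0 w 1, pvCellR w h adj bx by_ (cx, cy) v)
        (fun s cy v => Iff.trans
          (pv_mem_foldl_del _
            (fun cx v => pvCellR w h adj bx by_ (cx, cy) v)
            (fun s cx v => pv_mem_stepB w h adj bx by_ s cx cy v) _ s v)
          (by simp))]
      -- B's horizontal pass
      rw [pv_mem_foldl_set _
        (fun cy v => ∃ cx ∈ PySem.List.pyRange 0 w 1, v = (bx + cx * 200, by_ + cy * 200, 0))
        (fun s cy v => pv_mem_foldl_set _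
          (fun cx v => v = (bx + cx * 200, by_ + cy * 200, 0))
          (fun s cx v => PySem.Set.mem_add s _ v) _ s v)]
      -- B's vertical pass
      rw [pv_mem_foldl_set _
        (fun cy v => ∃ cx ∈ PySem.List.pyRange 0 (w + 1) 1, v = (bx + cx * 200, by_ + cy * 200, 90))
        (fun s cy v => pv_mem_foldl_set _
          (fun cx v => v = (bx + cx * 200, by_ + cy * 200, 90))
          (fun s cx v => PySem.Set.mem_add s _ v) _ s v)]
      simp only [PySem.Set.empty, List.not_mem_nil, false_or, PySem.List.mem_pyRange_one]
      rw [pv_crux w h adj bx by_ hw hh v]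
      constructor
      · rintro ⟨hfull, hR⟩
        exact ⟨hfull, fun cy hcy => by
          rintro ⟨cx, hcx, hr⟩
          exact hR cy hcy.1 hcy.2 cx hcx.1 hcx.2 hr⟩
      · rintro ⟨hfull, hR⟩
        exact ⟨hfull, fun cy hcy0 hcyh cx hcx0 hcxw hr =>
          hR cy ⟨hcy0, hcyh⟩ ⟨cx, ⟨hcx0, hcxw⟩, hr⟩⟩
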